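-- pv_equiv track=rewrite | github.com/hauteuar/analyzer | mainframe_analyzer/parser_rag/enhanced_flow_diagram_generator.py | _generate_call_summary
-- ===== SOURCE A (Python) =====
-- from typing import Dict, List, Any, Set, Tuple
--
-- def _generate_call_summary(calls: List[Dict]) -> Dict[str, int]:
--     """Generate summary statistics of call types"""
--     summary = {
--         'total': len(calls),
--         'static': 0,
--         'dynamic': 0,
--         'cics_link': 0,
--         'cics_xctl': 0
--     }
--
--     for call in calls:
--         mechanism = call.get('call_mechanism', 'STATIC_CALL')
--
--         if mechanism == 'STATIC_CALL':
--             summary['static'] += 1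
--         elif mechanism == 'DYNAMIC_CALL':
--             summary['dynamic'] += 1
--         elif mechanism in ['CICS_LINK', 'CICS_LINK_DYNAMIC']:
--             summary['cics_link'] += 1
--         elif mechanism in ['CICS_XCTL', 'CICS_XCTL_DYNAMIC']:
--             summary['cics_xctl'] += 1
--
--     return summary
-- ===== SOURCE B (Python) =====
-- _BUCKET = {
--     'STATIC_CALL': 'static',
--     'DYNAMIC_CALL': 'dynamic',
--     'CICS_LINK': 'cics_link',
--     'CICS_LINK_DYNAMIC': 'cics_link',
--     'CICS_XCTL': 'cics_xctl',
--     'CICS_XCTL_DYNAMIC': 'cics_xctl',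
-- }
--
-- def _generate_call_summary(calls):
--     """Generate summary statistics of call types"""
--     buckets = [_BUCKET.get(call.get('call_mechanism', 'STATIC_CALL')) for call in calls]
--     return {
--         'total': len(calls),
--         'static': buckets.count('static'),
--         'dynamic': buckets.count('dynamic'),
--         'cics_link': buckets.count('cics_link'),
--         'cics_xctl': buckets.count('cics_xctl'),
--     }
-- ===== Notes on version B (the rewrite author's own statement) =====
-- stated objective: idiomatic
-- what changed: B replaces A's if/elif chain with a mechanism-to-bucket lookup table: it maps each call to its bucket name in one comprehension, then fills the summary with four list.count passes over that bucket list instead of incrementing accumulators.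
import Mathlib
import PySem

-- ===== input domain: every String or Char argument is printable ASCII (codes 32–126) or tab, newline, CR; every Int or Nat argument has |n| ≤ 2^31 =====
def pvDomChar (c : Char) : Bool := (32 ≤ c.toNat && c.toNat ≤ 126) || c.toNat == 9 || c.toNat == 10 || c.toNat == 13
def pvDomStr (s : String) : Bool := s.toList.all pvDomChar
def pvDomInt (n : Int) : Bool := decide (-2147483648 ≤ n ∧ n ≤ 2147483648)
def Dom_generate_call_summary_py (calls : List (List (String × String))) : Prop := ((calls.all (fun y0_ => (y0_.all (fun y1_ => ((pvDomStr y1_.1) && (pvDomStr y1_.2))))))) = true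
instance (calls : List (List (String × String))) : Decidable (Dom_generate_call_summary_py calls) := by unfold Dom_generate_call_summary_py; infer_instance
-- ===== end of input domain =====

-- B replaces A's if/elif accumulator loop by a mechanism→bucket lookup table, a mapping
-- pass producing the bucket of each call, and four list.count passes (idiomatic; same cost).

-- ===== PORT A =====
-- A: seed a summary dict, then one pass incrementing the matching bucket via an if/elif chain.
def generate_call_summary_py (calls : List (List (String × String))) : List (String × Int) :=
  let summary : PySem.Dict String Int :=
    ((((PySem.Dict.empty.insert "total" (calls.length : Int)).insert "static" 0).insert
        "dynamic" 0).insert "cics_link" 0).insert "cics_xctl" 0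
  let final := calls.foldl (fun d call =>
    let m := (PySem.Dict.ofList call).getD "call_mechanism" "STATIC_CALL"
    if m = "STATIC_CALL" then d.modify "static" 0 (· + 1)
    else if m = "DYNAMIC_CALL" then d.modify "dynamic" 0 (· + 1)
    else if m ∈ (["CICS_LINK", "CICS_LINK_DYNAMIC"] : List String) then d.modify "cics_link" 0 (· + 1)
    else if m ∈ (["CICS_XCTL", "CICS_XCTL_DYNAMIC"] : List String) then d.modify "cics_xctl" 0 (· + 1)
    else d) summary
  final.items

-- ===== PORT B =====
-- B: the module-level _BUCKET table
def bucketTable : PySem.Dict String String :=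
  PySem.Dict.ofList
    [("STATIC_CALL", "static"), ("DYNAMIC_CALL", "dynamic"),
     ("CICS_LINK", "cics_link"), ("CICS_LINK_DYNAMIC", "cics_link"),
     ("CICS_XCTL", "cics_xctl"), ("CICS_XCTL_DYNAMIC", "cics_xctl")]

-- B: map each call to its bucket name via the table, then four list.count passes.
def generate_call_summary_py_alt (calls : List (List (String × String))) : List (String × Int) :=
  let buckets : List (Option String) := calls.map (fun call =>
    bucketTable.get? ((PySem.Dict.ofList call).getD "call_mechanism" "STATIC_CALL"))
  [("total", (calls.length : Int)),
   ("static", (PySem.List.count buckets (some "static") : Int)),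
   ("dynamic", (PySem.List.count buckets (some "dynamic") : Int)),
   ("cics_link", (PySem.List.count buckets (some "cics_link") : Int)),
   ("cics_xctl", (PySem.List.count buckets (some "cics_xctl") : Int))]

-- ===== PRECONDITION & SPEC =====
def Spec_generate_call_summary_py (calls : List (List (String × String))) (out : List (String × Int)) : Prop := out = generate_call_summary_py_alt calls
instance (calls : List (List (String × String))) (out : List (String × Int)) : Decidable (Spec_generate_call_summary_py calls out) := by unfold Spec_generate_call_summary_py; infer_instance

-- ===== CLAIM (what is proved, stated in full; the proofs are below) =====
def Claim_equal_generate_call_summary_py : Prop := ∀ (calls : List (List (String × String))), Dom_generate_call_summary_py calls → Spec_generate_call_summary_py calls (generate_call_summary_py calls)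

-- ===== LEMMAS AND PROOFS =====

-- the mechanism string of one call (the `call.get('call_mechanism', 'STATIC_CALL')` both programs evaluate)
def mech (call : List (String × String)) : String :=
  (PySem.Dict.ofList call).getD "call_mechanism" "STATIC_CALL"

-- A's loop body
def stepA (d : PySem.Dict String Int) (call : List (String × String)) : PySem.Dict String Int :=
  if mech call = "STATIC_CALL" then d.modify "static" 0 (· + 1)
  else if mech call = "DYNAMIC_CALL" then d.modify "dynamic" 0 (· + 1)
  else if mech call ∈ (["CICS_LINK", "CICS_LINK_DYNAMIC"] : List String) then d.modify "cics_link" 0 (· + 1)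
  else if mech call ∈ (["CICS_XCTL", "CICS_XCTL_DYNAMIC"] : List String) then d.modify "cics_xctl" 0 (· + 1)
  else d

-- A's summary dict with its five buckets as parameters
def mkS (t s dy l x : Int) : PySem.Dict String Int :=
  ((((PySem.Dict.empty.insert "total" t).insert "static" s).insert "dynamic" dy).insert
      "cics_link" l).insert "cics_xctl" x

theorem mkS_items (t s dy l x : Int) :
    (mkS t s dy l x).items =
      [("total", t), ("static", s), ("dynamic", dy), ("cics_link", l), ("cics_xctl", x)] := by
  simp [mkS, PySem.Dict.insert, PySem.Dict.empty]

theorem modify_static (t s dy l x : Int) :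
    (mkS t s dy l x).modify "static" 0 (· + 1) = mkS t (s + 1) dy l x := by
  simp [mkS, PySem.Dict.modify, PySem.Dict.insert, PySem.Dict.empty, PySem.Dict.getD, PySem.Dict.get?]

theorem modify_dynamic (t s dy l x : Int) :
    (mkS t s dy l x).modify "dynamic" 0 (· + 1) = mkS t s (dy + 1) l x := by
  simp [mkS, PySem.Dict.modify, PySem.Dict.insert, PySem.Dict.empty, PySem.Dict.getD, PySem.Dict.get?]

theorem modify_link (t s dy l x : Int) :
    (mkS t s dy l x).modify "cics_link" 0 (· + 1) = mkS t s dy (l + 1) x := by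
  simp [mkS, PySem.Dict.modify, PySem.Dict.insert, PySem.Dict.empty, PySem.Dict.getD, PySem.Dict.get?]

theorem modify_xctl (t s dy l x : Int) :
    (mkS t s dy l x).modify "cics_xctl" 0 (· + 1) = mkS t s dy l (x + 1) := by
  simp [mkS, PySem.Dict.modify, PySem.Dict.insert, PySem.Dict.empty, PySem.Dict.getD, PySem.Dict.get?]

-- A's loop, characterised by occurrence counts of the mechanism strings
theorem loopA (calls : List (List (String × String))) (t s dy l x : Int) :
    ((calls.foldl stepA (mkS t s dy l x)).items) =
      [("total", t),
       ("static", s + (((calls.map mech).count "STATIC_CALL" : Nat) : Int)),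
       ("dynamic", dy + (((calls.map mech).count "DYNAMIC_CALL" : Nat) : Int)),
       ("cics_link", l + (((calls.map mech).count "CICS_LINK" : Nat) : Int)
                       + (((calls.map mech).count "CICS_LINK_DYNAMIC" : Nat) : Int)),
       ("cics_xctl", x + (((calls.map mech).count "CICS_XCTL" : Nat) : Int)
                       + (((calls.map mech).count "CICS_XCTL_DYNAMIC" : Nat) : Int))] := by
  induction calls generalizing t s dy l x with
  | nil => simp [mkS_items]
  | cons c cs ih =>
    simp only [List.foldl_cons, List.map_cons]
    by_cases h1 : mech c = "STATIC_CALL"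
    · rw [show stepA (mkS t s dy l x) c = mkS t (s + 1) dy l x by
        simp [stepA, h1, modify_static]]
      rw [ih]; simp [h1]; omega
    · by_cases h2 : mech c = "DYNAMIC_CALL"
      · rw [show stepA (mkS t s dy l x) c = mkS t s (dy + 1) l x by
          simp [stepA, h2, modify_dynamic]]
        rw [ih]; simp [h2]; omega
      · by_cases h3 : mech c ∈ (["CICS_LINK", "CICS_LINK_DYNAMIC"] : List String)
        · rw [show stepA (mkS t s dy l x) c = mkS t s dy (l + 1) x by
            simp [stepA, h1, h2, h3, modify_link]]
          rw [ih]
          simp only [List.mem_cons, List.not_mem_nil, or_false] at h3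
          rcases h3 with h3 | h3
          · simp [h3]; ring
          · simp [h3]; ring
        · by_cases h4 : mech c ∈ (["CICS_XCTL", "CICS_XCTL_DYNAMIC"] : List String)
          · rw [show stepA (mkS t s dy l x) c = mkS t s dy l (x + 1) by
              simp [stepA, h1, h2, h3, h4, modify_xctl]]
            rw [ih]
            simp only [List.mem_cons, List.not_mem_nil, or_false] at h4
            rcases h4 with h4 | h4
            · simp [h4]; ring
            · simp [h4]; ring
          · rw [show stepA (mkS t s dy l x) c = mkS t s dy l x by
              simp [stepA, h1, h2, h3, h4]]
            rw [ih]
            simp only [List.mem_cons, List.not_mem_nil, or_false, not_or] at h3 h4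
            simp [h1, h2, h3.1, h3.2, h4.1, h4.2]

-- evaluation of the _BUCKET table on an arbitrary key
theorem bucket_eval (m : String) :
    bucketTable.get? m =
      if m = "STATIC_CALL" then some "static"
      else if m = "DYNAMIC_CALL" then some "dynamic"
      else if m = "CICS_LINK" then some "cics_link"
      else if m = "CICS_LINK_DYNAMIC" then some "cics_link"
      else if m = "CICS_XCTL" then some "cics_xctl"
      else if m = "CICS_XCTL_DYNAMIC" then some "cics_xctl"
      else none := by
  by_cases h1 : m = "STATIC_CALL"
  · subst h1; decide
  by_cases h2 : m = "DYNAMIC_CALL"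
  · subst h2; decide
  by_cases h3 : m = "CICS_LINK"
  · subst h3; decide
  by_cases h4 : m = "CICS_LINK_DYNAMIC"
  · subst h4; decide
  by_cases h5 : m = "CICS_XCTL"
  · subst h5; decide
  by_cases h6 : m = "CICS_XCTL_DYNAMIC"
  · subst h6; decide
  have hb : bucketTable.items =
      [("STATIC_CALL", "static"), ("DYNAMIC_CALL", "dynamic"),
       ("CICS_LINK", "cics_link"), ("CICS_LINK_DYNAMIC", "cics_link"),
       ("CICS_XCTL", "cics_xctl"), ("CICS_XCTL_DYNAMIC", "cics_xctl")] := by decide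
  simp only [PySem.Dict.get?, hb, h1, h2, h3, h4, h5, h6, if_false]
  rw [List.find?_eq_none.mpr ?_]
  · rfl
  · intro p hp
    fin_cases hp <;> simp <;> intro e <;> simp_all

-- counting one bucket over the mapped list = counting its source mechanism(s)
theorem countP_pair (ms : List String) (a b : String) (hab : a ≠ b) :
    ms.countP (fun m => m == a || m == b) = ms.count a + ms.count b := by
  induction ms with
  | nil => simp
  | cons c cs ih =>
    simp only [List.countP_cons, List.count_cons, ih]
    by_cases hca : c = a
    · simp [hca, hab]; omega
    · by_cases hcb : c = b
      · simp [hcb, Ne.symm hab]; omega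
      · simp [hca, hcb]

theorem count_bucket_single (ms : List String) (t src : String)
    (h : ∀ m, (bucketTable.get? m = some t) ↔ m = src) :
    (ms.map (fun m => bucketTable.get? m)).count (some t) = ms.count src := by
  rw [List.count_eq_countP, List.countP_map, List.count_eq_countP]
  apply List.countP_congr
  intro m _
  simp only [Function.comp]
  by_cases hm : bucketTable.get? m = some t
  · have e := (h m).mp hm
    subst e; simp [hm]
  · have : ¬ m = src := fun e => hm ((h m).mpr e)
    simp [hm, this]

theorem count_bucket_pair (ms : List String) (t s1 s2 : String) (h12 : s1 ≠ s2)
    (h : ∀ m, (bucketTable.get? m = some t) ↔ (m = s1 ∨ m = s2)) :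
    (ms.map (fun m => bucketTable.get? m)).count (some t) = ms.count s1 + ms.count s2 := by
  rw [List.count_eq_countP, List.countP_map, ← countP_pair ms s1 s2 h12]
  apply List.countP_congr
  intro m _
  simp only [Function.comp]
  by_cases hm : bucketTable.get? m = some t
  · rcases (h m).mp hm with e | e <;> (subst e; simp [hm])
  · have h1 : ¬ m = s1 := fun e => hm ((h m).mpr (Or.inl e))
    have h2 : ¬ m = s2 := fun e => hm ((h m).mpr (Or.inr e))
    simp [hm, h1, h2]

-- ===== VERDICT (by name: the statement is the Claim_ definition above) =====
theorem generate_call_summary_py_spec : Claim_equal_generate_call_summary_py := by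
  intro calls _
  show generate_call_summary_py calls = generate_call_summary_py_alt calls
  have hA : generate_call_summary_py calls
      = (calls.foldl stepA (mkS (calls.length : Int) 0 0 0 0)).items := rfl
  have hmap : (calls.map (fun call =>
      bucketTable.get? ((PySem.Dict.ofList call).getD "call_mechanism" "STATIC_CALL")))
      = (calls.map mech).map (fun m => bucketTable.get? m) := by
    simp [mech, List.map_map, Function.comp]
  rw [hA, loopA]
  simp only [generate_call_summary_py_alt, PySem.List.count_eq, hmap]
  rw [count_bucket_single _ "static" "STATIC_CALL" (by intro m; rw [bucket_eval]; split_ifs <;> simp_all),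
      count_bucket_single _ "dynamic" "DYNAMIC_CALL" (by intro m; rw [bucket_eval]; split_ifs <;> simp_all),
      count_bucket_pair _ "cics_link" "CICS_LINK" "CICS_LINK_DYNAMIC" (by decide)
        (by intro m; rw [bucket_eval]; split_ifs <;> simp_all),
      count_bucket_pair _ "cics_xctl" "CICS_XCTL" "CICS_XCTL_DYNAMIC" (by decide)
        (by intro m; rw [bucket_eval]; split_ifs <;> simp_all)]
  simp
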